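-- pv_equiv track=rewrite | github.com/edwardisintou/MarioAIAgents | trial2.py | nearest_object
-- ===== SOURCE A (Python) =====
-- def nearest_object(mario_position, enemy_position, pipe_position, hole_position, first_stair_position, second_stair_location):
--     objects = []
--     locations = []
--
--     for object in enemy_position, pipe_position, hole_position, first_stair_position, second_stair_location:
--         if object is not None:
--             objects.append(object)
--             location = object[0] - mario_position[0]
--             locations.append(location)
--
--     if len(objects) == 0:
--         return (0, 0)
--
--     return objects[locations.index(find_min_location(locations))]
--
-- def find_min_location(locations):
--     min_location = max(locations)
--
--     for location in locations:
--         if location > 0: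
--             if location < min_location:
--                 min_location = location
--
--     return min_location
-- ===== SOURCE B (Python) =====
-- def nearest_object(mario_position, enemy_position, pipe_position, hole_position, first_stair_position, second_stair_location):
--     # One fused pass: track the nearest object strictly ahead of Mario (smallest
--     # positive distance) and, as a fallback, the object with the largest distance.
--     best_obj = best_d = None
--     fb_obj = fb_d = None
--     for obj in (enemy_position, pipe_position, hole_position, first_stair_position, second_stair_location):
--         if obj is None:
--             continue
--         d = obj[0] - mario_position[0]
--         if d > 0 and (best_d is None or d < best_d):
--             best_obj, best_d = obj, d
--         if fb_d is None or d > fb_d: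
--             fb_obj, fb_d = obj, d
--     if best_obj is not None:
--         return best_obj
--     if fb_obj is not None:
--         return fb_obj
--     return (0, 0)
-- ===== Notes on version B (the rewrite author's own statement) =====
-- stated objective: simpler
-- what changed: Replaces A's build-two-parallel-lists + find_min_location (max seed lowered by a second scan) + list.index lookup with a single fused pass that tracks the nearest object strictly ahead and a max-distance fallback.
import Mathlib
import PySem

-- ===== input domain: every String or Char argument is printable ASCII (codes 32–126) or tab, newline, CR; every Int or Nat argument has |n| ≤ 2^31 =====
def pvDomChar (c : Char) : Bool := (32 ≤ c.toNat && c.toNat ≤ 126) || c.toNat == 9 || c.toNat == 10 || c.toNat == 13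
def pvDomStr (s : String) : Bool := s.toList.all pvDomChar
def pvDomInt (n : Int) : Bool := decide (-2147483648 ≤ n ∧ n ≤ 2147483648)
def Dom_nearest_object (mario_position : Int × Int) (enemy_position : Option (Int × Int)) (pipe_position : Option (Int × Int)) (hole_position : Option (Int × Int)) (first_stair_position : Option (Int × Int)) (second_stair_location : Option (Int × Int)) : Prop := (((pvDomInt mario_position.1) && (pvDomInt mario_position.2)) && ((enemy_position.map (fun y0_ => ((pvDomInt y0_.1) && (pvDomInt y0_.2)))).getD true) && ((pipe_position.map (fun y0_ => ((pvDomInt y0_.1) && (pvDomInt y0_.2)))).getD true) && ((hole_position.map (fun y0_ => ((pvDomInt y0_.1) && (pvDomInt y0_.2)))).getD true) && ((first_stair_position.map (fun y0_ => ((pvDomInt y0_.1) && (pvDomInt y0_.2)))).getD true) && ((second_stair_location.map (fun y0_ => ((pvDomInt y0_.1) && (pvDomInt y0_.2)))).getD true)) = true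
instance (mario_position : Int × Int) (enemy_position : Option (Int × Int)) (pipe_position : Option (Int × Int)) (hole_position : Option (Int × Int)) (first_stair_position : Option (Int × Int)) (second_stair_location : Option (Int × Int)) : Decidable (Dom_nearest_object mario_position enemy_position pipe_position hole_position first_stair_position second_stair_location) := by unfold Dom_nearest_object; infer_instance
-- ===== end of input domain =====

-- B replaces A's build-two-lists + find_min_location + list.index structure with one fused pass
-- maintaining the running nearest-ahead object and a max-distance fallback (objective: simpler).

-- ===== PORT A =====

-- helper find_min_location: min_location starts at max(locations), then the loop
-- lowers it to any positive location smaller than the current value.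
-- max(locations) is only ever called on a nonempty list (A checks len(objects) == 0 first),
-- so the .getD 0 default is unreachable.
def find_min_location (locations : List Int) : Int :=
  let min_location := (PySem.List.max? locations (fun y => y)).getD 0
  locations.foldl (fun m l => if 0 < l then (if l < m then l else m) else m) min_location

def nearest_object (mario_position : Int × Int) (enemy_position : Option (Int × Int)) (pipe_position : Option (Int × Int)) (hole_position : Option (Int × Int)) (first_stair_position : Option (Int × Int)) (second_stair_location : Option (Int × Int)) : Int × Int :=
  let acc := [enemy_position, pipe_position, hole_position, first_stair_position, second_stair_location].foldl
    (fun (acc : List (Int × Int) × List Int) obj =>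
      match obj with
      | none => acc
      | some o => (acc.1 ++ [o], acc.2 ++ [o.1 - mario_position.1])) ([], [])
  let objects := acc.1
  let locations := acc.2
  if objects.length = 0 then (0, 0)
  else
    -- objects[locations.index(find_min_location(locations))]: the value is an element of
    -- locations and the index is in range, so neither fallback below is reachable.
    match PySem.List.index? locations (find_min_location locations) with
    | none => (0, 0)
    | some i => (PySem.List.pyGet? objects (i : Int)).getD (0, 0)

-- ===== PORT B =====

-- one loop step of Source B: update (best_obj,best_d) and (fb_obj,fb_d) from one optional object
def bStep (mx : Int) (st : Option ((Int × Int) × Int) × Option ((Int × Int) × Int)) (obj : Option (Int × Int)) : Option ((Int × Int) × Int) × Option ((Int × Int) × Int) :=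
  match obj with
  | none => st
  | some o =>
    let d := o.1 - mx
    let best := match st.1 with
      | none => if 0 < d then some (o, d) else none
      | some (b, bd) => if 0 < d ∧ d < bd then some (o, d) else some (b, bd)
    let fb := match st.2 with
      | none => some (o, d)
      | some (fo, fd) => if fd < d then some (o, d) else some (fo, fd)
    (best, fb)

def nearest_object_alt (mario_position : Int × Int) (enemy_position : Option (Int × Int)) (pipe_position : Option (Int × Int)) (hole_position : Option (Int × Int)) (first_stair_position : Option (Int × Int)) (second_stair_location : Option (Int × Int)) : Int × Int :=
  let st := [enemy_position, pipe_position, hole_position, first_stair_position, second_stair_location].foldl (bStep mario_position.1) (none, none)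
  match st.1 with
  | some (b, _) => b
  | none =>
    match st.2 with
    | some (fo, _) => fo
    | none => (0, 0)

-- ===== PRECONDITION & SPEC =====
def Spec_nearest_object (mario_position : Int × Int) (enemy_position : Option (Int × Int)) (pipe_position : Option (Int × Int)) (hole_position : Option (Int × Int)) (first_stair_position : Option (Int × Int)) (second_stair_location : Option (Int × Int)) (out : Int × Int) : Prop := out = nearest_object_alt mario_position enemy_position pipe_position hole_position first_stair_position second_stair_location
instance (mario_position : Int × Int) (enemy_position : Option (Int × Int)) (pipe_position : Option (Int × Int)) (hole_position : Option (Int × Int)) (first_stair_position : Option (Int × Int)) (second_stair_location : Option (Int × Int)) (out : Int × Int) : Decidable (Spec_nearest_object mario_position enemy_position pipe_position hole_position first_stair_position second_stair_location out) := by unfold Spec_nearest_object; infer_instance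

-- ===== CLAIM (what is proved, stated in full; the proofs are below) =====
def Claim_equal_nearest_object : Prop := ∀ (mario_position : Int × Int) (enemy_position : Option (Int × Int)) (pipe_position : Option (Int × Int)) (hole_position : Option (Int × Int)) (first_stair_position : Option (Int × Int)) (second_stair_location : Option (Int × Int)), Dom_nearest_object mario_position enemy_position pipe_position hole_position first_stair_position second_stair_location → Spec_nearest_object mario_position enemy_position pipe_position hole_position first_stair_position second_stair_location (nearest_object mario_position enemy_position pipe_position hole_position first_stair_position second_stair_location)

-- ===== LEMMAS AND PROOFS =====

-- the signed distance of an object from Mario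
def pvDist (mx : Int) (o : Int × Int) : Int := o.1 - mx

-- minimum of the positive elements of a list (value only)
def posMinL : List Int → Option Int
  | [] => none
  | l :: t => if 0 < l then some (match posMinL t with | none => l | some p => min l p) else posMinL t

-- maximum of a list (value only)
def maxL : List Int → Option Int
  | [] => none
  | l :: t => some (match maxL t with | none => l | some m => max l m)

-- the per-component loop steps of B's fused fold
def bestStep (mx : Int) (st : Option ((Int × Int) × Int)) (o : Int × Int) : Option ((Int × Int) × Int) :=
  match st with
  | none => if 0 < pvDist mx o then some (o, pvDist mx o) else none
  | some (b, bd) => if 0 < pvDist mx o ∧ pvDist mx o < bd then some (o, pvDist mx o) else some (b, bd)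

def fbStep (mx : Int) (st : Option ((Int × Int) × Int)) (o : Int × Int) : Option ((Int × Int) × Int) :=
  match st with
  | none => some (o, pvDist mx o)
  | some (fo, fd) => if fd < pvDist mx o then some (o, pvDist mx o) else some (fo, fd)

lemma posMinL_pos {ls : List Int} {p : Int} (h : posMinL ls = some p) : 0 < p := by
  induction ls generalizing p with
  | nil => simp [posMinL] at h
  | cons l t ih =>
    simp only [posMinL] at h
    by_cases hl : 0 < l
    · rw [if_pos hl] at h
      cases ht : posMinL t with
      | none => rw [ht] at h; simp only [Option.some.injEq] at h; omega
      | some q =>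
        rw [ht] at h; simp only [Option.some.injEq] at h
        have := ih ht
        have h1 := min_le_left l q
        have h2 := min_le_right l q
        rcases le_total l q with hle | hle
        · rw [min_eq_left hle] at h; omega
        · rw [min_eq_right hle] at h; omega
    · rw [if_neg hl] at h; exact ih h

lemma posMinL_mem {ls : List Int} {p : Int} (h : posMinL ls = some p) : p ∈ ls := by
  induction ls generalizing p with
  | nil => simp [posMinL] at h
  | cons l t ih =>
    simp only [posMinL] at h
    by_cases hl : 0 < l
    · rw [if_pos hl] at h
      cases ht : posMinL t with
      | none =>
        rw [ht] at h; simp only [Option.some.injEq] at h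
        exact h ▸ List.mem_cons_self
      | some q =>
        rw [ht] at h; simp only [Option.some.injEq] at h
        rcases le_total l q with hle | hle
        · rw [min_eq_left hle] at h; exact h ▸ List.mem_cons_self
        · rw [min_eq_right hle] at h; exact List.mem_cons_of_mem _ (h ▸ ih ht)
    · rw [if_neg hl] at h; exact List.mem_cons_of_mem _ (ih h)

lemma maxL_mem {ls : List Int} {m : Int} (h : maxL ls = some m) : m ∈ ls := by
  induction ls generalizing m with
  | nil => simp [maxL] at h
  | cons l t ih =>
    simp only [maxL, Option.some.injEq] at h
    cases ht : maxL t with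
    | none => rw [ht] at h; simp only [] at h; exact h ▸ List.mem_cons_self
    | some q =>
      rw [ht] at h; simp only [] at h
      rcases le_total q l with hle | hle
      · rw [max_eq_left hle] at h; exact h ▸ List.mem_cons_self
      · rw [max_eq_right hle] at h; exact List.mem_cons_of_mem _ (h ▸ ih ht)

lemma maxL_isMax {ls : List Int} {m : Int} (h : maxL ls = some m) : ∀ l ∈ ls, l ≤ m := by
  induction ls generalizing m with
  | nil => simp [maxL] at h
  | cons l t ih =>
    intro x hx
    simp only [maxL, Option.some.injEq] at h
    cases ht : maxL t with
    | none =>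
      rw [ht] at h; simp only [] at h
      rcases List.mem_cons.1 hx with rfl | hxt
      · omega
      · cases t with
        | nil => simp at hxt
        | cons a s => simp [maxL] at ht
    | some q =>
      rw [ht] at h; simp only [] at h
      have h1 := le_max_left l q
      have h2 := le_max_right l q
      rcases List.mem_cons.1 hx with rfl | hxt
      · omega
      · have := ih ht x hxt; omega

lemma posMinL_le_maxL {ls : List Int} {p m : Int} (hp : posMinL ls = some p)
    (hm : maxL ls = some m) : p ≤ m :=
  maxL_isMax hm p (posMinL_mem hp)

-- K1: the find_min_location fold computes min of the start value and the positive minimum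
lemma fml_foldl (ls : List Int) (m : Int) :
    ls.foldl (fun m l => if 0 < l then (if l < m then l else m) else m) m =
      match posMinL ls with | none => m | some p => min m p := by
  induction ls generalizing m with
  | nil => simp [posMinL]
  | cons l t ih =>
    rw [List.foldl_cons, ih]
    simp only [posMinL]
    by_cases hl : 0 < l
    · rw [if_pos hl, if_pos hl]
      cases ht : posMinL t with
      | none => simp only []; rw [Int.min_def]; split_ifs <;> omega
      | some q =>
        simp only []
        have h1 := min_le_left l q
        have h2 := min_le_right l q
        rw [Int.min_def, Int.min_def, Int.min_def]
        split_ifs <;> omega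
    · rw [if_neg hl, if_neg hl]

lemma foldl_max_eq_maxL (t : List Int) : ∀ x : Int,
    t.foldl max x = match maxL t with | none => x | some m => max x m := by
  induction t with
  | nil => intro x; simp [maxL]
  | cons l t ih =>
    intro x
    rw [List.foldl_cons, ih]
    simp only [maxL]
    cases ht : maxL t with
    | none => simp only []
    | some q =>
      simp only []
      rw [Int.max_def, Int.max_def, Int.max_def, Int.max_def]
      split_ifs <;> omega

-- Python max(ls) (first extremal element) has the value maxL ls
lemma max?_eq_maxL (ls : List Int) (h : ls ≠ []) :
    PySem.List.max? ls (fun y => y) = maxL ls := by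
  cases ls with
  | nil => exact absurd rfl h
  | cons x t =>
    rw [PySem.List.max?_id_cons, foldl_max_eq_maxL]
    simp only [maxL]

lemma find_min_location_eq (ls : List Int) (h : ls ≠ []) :
    find_min_location ls =
      match posMinL ls with
      | some p => p
      | none => (maxL ls).getD 0 := by
  unfold find_min_location
  rw [max?_eq_maxL ls h]
  cases hM : maxL ls with
  | none =>
    cases ls with
    | nil => exact absurd rfl h
    | cons a s => simp [maxL] at hM
  | some M =>
    simp only [Option.getD_some]
    rw [fml_foldl]
    cases hp : posMinL ls with
    | none => simp only []
    | some p =>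
      simp only []
      have h1 : p ≤ M := posMinL_le_maxL hp hM
      rw [Int.min_def]
      split_ifs <;> omega

-- K3: objects[locations.index(v)] (with A's unreachable fallbacks) is the first object at distance v
lemma index_find (mx : Int) (objs : List (Int × Int)) (v : Int) :
    (match PySem.List.index? (objs.map (pvDist mx)) v with
     | none => ((0 : Int), (0 : Int))
     | some i => (PySem.List.pyGet? objs (i : Int)).getD (0, 0)) =
      (objs.find? (fun o => pvDist mx o == v)).getD (0, 0) := by
  induction objs with
  | nil => simp [PySem.List.index?]
  | cons o t ih =>
    simp only [List.map_cons]
    by_cases he : pvDist mx o = v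
    · have h0 : PySem.List.index? (pvDist mx o :: t.map (pvDist mx)) v = some 0 := by
        rw [he]; exact PySem.List.index?_cons_self v _
      rw [h0, List.find?_cons_of_pos (p := fun o => pvDist mx o == v) (by simp [he])]
      simp only []
      simp
    · rw [PySem.List.index?_cons_of_ne _ he,
        List.find?_cons_of_neg (p := fun o => pvDist mx o == v) (by simp [he])]
      cases h2 : PySem.List.index? (t.map (pvDist mx)) v with
      | none => rw [h2] at ih; simp only [Option.map_none]; simpa using ih
      | some i =>
        rw [h2] at ih
        simp only [Option.map_some]
        have hc : ((i + 1 : Nat) : Int) = ((i : Nat) : Int) + 1 := by push_cast; ring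
        rw [hc, PySem.List.pyGet?_cons_succ]
        exact ih

-- B's fused fold is the product of the two per-component folds
lemma bStep_split (mx : Int) (pairs : List (Option (Int × Int)))
    (st : Option ((Int × Int) × Int) × Option ((Int × Int) × Int)) :
    pairs.foldl (bStep mx) st =
      ((pairs.filterMap id).foldl (bestStep mx) st.1,
       (pairs.filterMap id).foldl (fbStep mx) st.2) := by
  induction pairs generalizing st with
  | nil => rfl
  | cons p t ih =>
    cases p with
    | none => rw [List.foldl_cons]; exact ih st
    | some o =>
      rw [List.foldl_cons, ih]
      rfl

-- A's list-building fold produces the present objects and their distances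
lemma build_eq (mx : Int) (pairs : List (Option (Int × Int)))
    (acc : List (Int × Int) × List Int) :
    pairs.foldl
      (fun (acc : List (Int × Int) × List Int) obj =>
        match obj with
        | none => acc
        | some o => (acc.1 ++ [o], acc.2 ++ [o.1 - mx])) acc =
      (acc.1 ++ pairs.filterMap id, acc.2 ++ (pairs.filterMap id).map (pvDist mx)) := by
  induction pairs generalizing acc with
  | nil => simp
  | cons p t ih =>
    cases p with
    | none => rw [List.foldl_cons]; simpa using ih acc
    | some o =>
      rw [List.foldl_cons, ih]
      simp [pvDist]

-- K4b: the best-tracking fold from a positive seed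
lemma bestStep_some (mx : Int) (objs : List (Int × Int)) :
    ∀ b bd, 0 < bd →
    objs.foldl (bestStep mx) (some (b, bd)) =
      match posMinL (objs.map (pvDist mx)) with
      | none => some (b, bd)
      | some p =>
          if p < bd then (objs.find? (fun o => pvDist mx o == p)).map (fun o => (o, p))
          else some (b, bd) := by
  induction objs with
  | nil => intro b bd _; simp [posMinL]
  | cons o t ih =>
    intro b bd hbd
    rw [List.foldl_cons]
    simp only [List.map_cons, posMinL, bestStep]
    by_cases hc : 0 < pvDist mx o ∧ pvDist mx o < bd
    · rw [if_pos hc, if_pos hc.1, ih o (pvDist mx o) hc.1]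
      cases ht : posMinL (t.map (pvDist mx)) with
      | none =>
        simp only []
        rw [if_pos hc.2, List.find?_cons_of_pos (p := fun x => pvDist mx x == pvDist mx o) (by simp)]
        rfl
      | some p =>
        simp only []
        have hmin1 := min_le_left (pvDist mx o) p
        rw [if_pos (by omega : min (pvDist mx o) p < bd)]
        by_cases hpd : p < pvDist mx o
        · rw [if_pos hpd, min_eq_right (by omega),
            List.find?_cons_of_neg (p := fun x => pvDist mx x == p) (by simp; omega)]
        · rw [if_neg hpd, min_eq_left (by omega),
            List.find?_cons_of_pos (p := fun x => pvDist mx x == pvDist mx o) (by simp)]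
          rfl
    · rw [if_neg hc, ih b bd hbd]
      by_cases hd : 0 < pvDist mx o
      · rw [if_pos hd]
        have hbdle : bd ≤ pvDist mx o := by omega
        cases ht : posMinL (t.map (pvDist mx)) with
        | none => simp only []; rw [if_neg (by omega : ¬ pvDist mx o < bd)]
        | some p =>
          simp only []
          have hppos := posMinL_pos ht
          by_cases hpbd : p < bd
          · rw [if_pos hpbd, min_eq_right (by omega), if_pos hpbd,
              List.find?_cons_of_neg (p := fun x => pvDist mx x == p) (by simp; omega)]
          · rw [if_neg hpbd]
            have hnm : ¬ min (pvDist mx o) p < bd := by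
              rcases le_total (pvDist mx o) p with hle | hle
              · rw [min_eq_left hle]; omega
              · rw [min_eq_right hle]; omega
            rw [if_neg hnm]
      · rw [if_neg hd]
        cases ht : posMinL (t.map (pvDist mx)) with
        | none => simp only []
        | some p =>
          simp only []
          have hppos := posMinL_pos ht
          by_cases hpbd : p < bd
          · rw [if_pos hpbd, if_pos hpbd,
              List.find?_cons_of_neg (p := fun x => pvDist mx x == p) (by simp; omega)]
          · rw [if_neg hpbd, if_neg hpbd]

-- K4a: the best-tracking fold from none finds the first object at the positive minimum
lemma bestStep_none (mx : Int) (objs : List (Int × Int)) :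
    objs.foldl (bestStep mx) none =
      match posMinL (objs.map (pvDist mx)) with
      | none => none
      | some p => (objs.find? (fun o => pvDist mx o == p)).map (fun o => (o, p)) := by
  induction objs with
  | nil => simp [posMinL]
  | cons o t ih =>
    rw [List.foldl_cons]
    simp only [List.map_cons, posMinL, bestStep]
    by_cases hd : 0 < pvDist mx o
    · rw [if_pos hd, if_pos hd, bestStep_some mx t o (pvDist mx o) hd]
      cases ht : posMinL (t.map (pvDist mx)) with
      | none =>
        simp only []
        rw [List.find?_cons_of_pos (p := fun x => pvDist mx x == pvDist mx o) (by simp)]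
        rfl
      | some p =>
        simp only []
        by_cases hpd : p < pvDist mx o
        · rw [if_pos hpd, min_eq_right (by omega),
            List.find?_cons_of_neg (p := fun x => pvDist mx x == p) (by simp; omega)]
        · rw [if_neg hpd, min_eq_left (by omega),
            List.find?_cons_of_pos (p := fun x => pvDist mx x == pvDist mx o) (by simp)]
          rfl
    · rw [if_neg hd, if_neg hd, ih]
      cases ht : posMinL (t.map (pvDist mx)) with
      | none => simp only []
      | some p =>
        simp only []
        have hppos := posMinL_pos ht
        rw [List.find?_cons_of_neg (p := fun x => pvDist mx x == p) (by simp; omega)]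

-- K5b: the fallback-tracking fold from a seed
lemma fbStep_some (mx : Int) (objs : List (Int × Int)) :
    ∀ fo fd,
    objs.foldl (fbStep mx) (some (fo, fd)) =
      match maxL (objs.map (pvDist mx)) with
      | none => some (fo, fd)
      | some m =>
          if fd < m then (objs.find? (fun o => pvDist mx o == m)).map (fun o => (o, m))
          else some (fo, fd) := by
  induction objs with
  | nil => intro fo fd; simp [maxL]
  | cons o t ih =>
    intro fo fd
    rw [List.foldl_cons]
    simp only [List.map_cons, maxL, fbStep]
    by_cases hc : fd < pvDist mx o
    · rw [if_pos hc, ih o (pvDist mx o)]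
      cases ht : maxL (t.map (pvDist mx)) with
      | none =>
        simp only []
        rw [if_pos hc, List.find?_cons_of_pos (p := fun x => pvDist mx x == pvDist mx o) (by simp)]
        rfl
      | some m =>
        simp only []
        by_cases hdm : pvDist mx o < m
        · rw [if_pos hdm, max_eq_right (by omega), if_pos (by omega : fd < m),
            List.find?_cons_of_neg (p := fun x => pvDist mx x == m) (by simp; omega)]
        · rw [if_neg hdm, max_eq_left (by omega), if_pos hc,
            List.find?_cons_of_pos (p := fun x => pvDist mx x == pvDist mx o) (by simp)]
          rfl
    · rw [if_neg hc, ih fo fd]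
      cases ht : maxL (t.map (pvDist mx)) with
      | none => simp only []; rw [if_neg hc]
      | some m =>
        simp only []
        by_cases hfm : fd < m
        · rw [if_pos hfm, max_eq_right (by omega), if_pos hfm,
            List.find?_cons_of_neg (p := fun x => pvDist mx x == m) (by simp; omega)]
        · rw [if_neg hfm]
          have hnm : ¬ fd < max (pvDist mx o) m := by
            rcases le_total (pvDist mx o) m with hle | hle
            · rw [max_eq_right hle]; omega
            · rw [max_eq_left hle]; omega
          rw [if_neg hnm]

-- K5a: the fallback-tracking fold from none finds the first object at the maximum
lemma fbStep_none (mx : Int) (objs : List (Int × Int)) :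
    objs.foldl (fbStep mx) none =
      match maxL (objs.map (pvDist mx)) with
      | none => none
      | some m => (objs.find? (fun o => pvDist mx o == m)).map (fun o => (o, m)) := by
  induction objs with
  | nil => simp [maxL]
  | cons o t ih =>
    rw [List.foldl_cons]
    simp only [List.map_cons, maxL, fbStep]
    rw [fbStep_some mx t o (pvDist mx o)]
    cases ht : maxL (t.map (pvDist mx)) with
    | none =>
      simp only []
      rw [List.find?_cons_of_pos (p := fun x => pvDist mx x == pvDist mx o) (by simp)]
      rfl
    | some m =>
      simp only []
      by_cases hdm : pvDist mx o < m
      · rw [if_pos hdm, max_eq_right (by omega),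
          List.find?_cons_of_neg (p := fun x => pvDist mx x == m) (by simp; omega)]
      · rw [if_neg hdm, max_eq_left (by omega),
          List.find?_cons_of_pos (p := fun x => pvDist mx x == pvDist mx o) (by simp)]
        rfl

-- the two value-level pipelines agree on any object list
lemma core_eq (mx : Int) (objs : List (Int × Int)) :
    (if objs.length = 0 then ((0 : Int), (0 : Int))
     else
       match PySem.List.index? (objs.map (pvDist mx)) (find_min_location (objs.map (pvDist mx))) with
       | none => (0, 0)
       | some i => (PySem.List.pyGet? objs (i : Int)).getD (0, 0)) =
      (match objs.foldl (bestStep mx) none with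
       | some (b, _) => b
       | none =>
         match objs.foldl (fbStep mx) none with
         | some (fo, _) => fo
         | none => (0, 0)) := by
  cases hobjs : objs with
  | nil => simp
  | cons o t =>
    rw [← hobjs]
    have hne : objs.map (pvDist mx) ≠ [] := by rw [hobjs]; simp
    have hlen : ¬ objs.length = 0 := by rw [hobjs]; simp
    rw [if_neg hlen, find_min_location_eq _ hne, bestStep_none, fbStep_none]
    cases hp : posMinL (objs.map (pvDist mx)) with
    | some p =>
      simp only []
      rw [index_find]
      have hmem : p ∈ objs.map (pvDist mx) := posMinL_mem hp
      rcases List.mem_map.1 hmem with ⟨w0, hw0, hwp⟩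
      have hfind : (objs.find? (fun o => pvDist mx o == p)).isSome := by
        rw [List.find?_isSome]
        exact ⟨w0, hw0, by simp [hwp]⟩
      rcases Option.isSome_iff_exists.1 hfind with ⟨w, hw⟩
      rw [hw]
      rfl
    | none =>
      simp only []
      cases hM : maxL (objs.map (pvDist mx)) with
      | none =>
        rw [hobjs] at hM; simp [maxL] at hM
      | some M =>
        simp only [Option.getD_some]
        rw [index_find]
        have hmem : M ∈ objs.map (pvDist mx) := maxL_mem hM
        rcases List.mem_map.1 hmem with ⟨w0, hw0, hwp⟩
        have hfind : (objs.find? (fun o => pvDist mx o == M)).isSome := by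
          rw [List.find?_isSome]
          exact ⟨w0, hw0, by simp [hwp]⟩
        rcases Option.isSome_iff_exists.1 hfind with ⟨w, hw⟩
        rw [hw]
        rfl

-- ===== VERDICT (by name: the statement is the Claim_ definition above) =====
theorem nearest_object_spec : Claim_equal_nearest_object := by
  intro mp e p h f s _hdom
  unfold Spec_nearest_object nearest_object nearest_object_alt
  rw [build_eq mp.1, bStep_split]
  simp only [List.nil_append]
  exact core_eq mp.1 _
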